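-- pv_equiv track=rewrite | github.com/vasanthireddy11/MastersProjects | AlgorithmsAssignments/assignment8/mtfopt.py | MTFC
-- ===== SOURCE A (Python) =====
-- from copy import deepcopy as copy
--
-- def MTFC(in_cache, requests):
--
--     L = copy(in_cache)
--     cost = 0
--     for r in requests:
--         i = 0
--         while i < len(L):
--             if r == L[i]:
--                 cost += i + 1
--                 L = [L[i]] + L[:i] + L[i + 1:]
--                 break
--             i += 1
--     return cost
-- ===== SOURCE B (Python) =====
-- def MTFC(in_cache, requests):
--     # Timestamp formulation of move-to-front: never rebuild the cache list.
--     # Each cache slot keeps a "last used" timestamp; the virtual position of a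
--     # slot is the number of slots with a larger timestamp.
--     vals = list(in_cache)
--     tss = [-i for i in range(len(vals))]
--     step = 1
--     cost = 0
--     for r in requests:
--         best = None  # (timestamp, index) of the most recently used slot holding r
--         for j, (v, t) in enumerate(zip(vals, tss)):
--             if v == r and (best is None or t > best[0]):
--                 best = (t, j)
--         if best is not None:
--             bt, bj = best
--             cost += 1 + sum(1 for t in tss if t > bt)
--             tss[bj] = step
--             step += 1
--     return cost
-- ===== Notes on version B (the rewrite author's own statement) =====
-- stated objective: alternative
-- what changed: B never rebuilds or reorders the cache list: it keeps a last-used timestamp per cache slot and computes each access cost as 1 + (number of slots with a larger timestamp), updating one timestamp per hit, instead of A's index scan plus list reconstruction per request.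
import Mathlib
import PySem

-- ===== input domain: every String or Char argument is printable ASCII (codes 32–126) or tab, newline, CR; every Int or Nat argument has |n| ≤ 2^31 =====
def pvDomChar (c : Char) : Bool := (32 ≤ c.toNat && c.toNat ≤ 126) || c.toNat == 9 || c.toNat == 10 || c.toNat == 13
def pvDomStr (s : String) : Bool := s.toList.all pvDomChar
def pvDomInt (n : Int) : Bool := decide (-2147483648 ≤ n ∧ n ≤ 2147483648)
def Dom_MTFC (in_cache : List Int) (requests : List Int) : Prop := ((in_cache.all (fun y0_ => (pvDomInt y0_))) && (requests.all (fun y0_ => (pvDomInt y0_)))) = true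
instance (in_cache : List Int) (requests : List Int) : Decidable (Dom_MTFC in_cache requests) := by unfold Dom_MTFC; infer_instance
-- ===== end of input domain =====

-- B replaces A's per-request scan-and-rebuild of the cache list by per-slot last-used
-- timestamps: the cost of a hit is 1 + (number of slots with a larger timestamp); the
-- list is never reordered (objective: alternative; return value only, no mutation).

-- ===== PORT A =====
-- A's inner 'while i < len(L)' loop: returns the index i at which it breaks (r == L[i]),
-- none if it runs off the end.
def MTFC_scan (r : Int) (L : List Int) (i : Nat) : Option Nat :=
  if h : i < L.length then
    if r == L[i] then some i else MTFC_scan r L (i + 1)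
  else none
termination_by L.length - i

-- one iteration of A's 'for r in requests' body; at the break r == L[i], so [L[i]] = [r],
-- and the slices L[:i] / L[i+1:] with 0 ≤ i < len(L) are take i / drop (i+1) exactly.
def MTFC_step (st : List Int × Int) (r : Int) : List Int × Int :=
  match MTFC_scan r st.1 0 with
  | none => st
  | some i => (r :: (st.1.take i ++ st.1.drop (i + 1)), st.2 + ((i : Int) + 1))

def MTFC (in_cache : List Int) (requests : List Int) : Int :=
  (requests.foldl MTFC_step (in_cache, 0)).2

-- ===== PORT B =====
-- B's inner 'for j, (v, t) in enumerate(zip(vals, tss))' loop; the enumerate counter j is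
-- carried explicitly (it is always ≥ 0, hence a Nat); best = None ↦ none, best = (t, j) ↦ some (t, j).
def MTFC_alt_find (r : Int) (pairs : List (Int × Int)) (j : Nat) (best : Option (Int × Nat)) :
    Option (Int × Nat) :=
  match pairs with
  | [] => best
  | (v, t) :: rest =>
      MTFC_alt_find r rest (j + 1)
        (if v == r && (match best with | none => true | some (bt, _) => decide (bt < t))
         then some (t, j) else best)

-- one iteration of B's request loop; 'tss[bj] = step' with 0 ≤ bj < len(tss) is List.set
-- exactly, and 'sum(1 for t in tss if t > bt)' is countP.
def MTFC_alt_step (vals : List Int) (st : List Int × Int × Int) (r : Int) : List Int × Int × Int :=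
  match MTFC_alt_find r (vals.zip st.1) 0 none with
  | none => st
  | some (bt, bj) =>
      (st.1.set bj st.2.1, st.2.1 + 1, st.2.2 + 1 + (st.1.countP (fun t => decide (bt < t)) : Int))

-- 'tss = [-i for i in range(len(vals))]'; state is (tss, step, cost), initially (tss, 1, 0).
def MTFC_alt (in_cache : List Int) (requests : List Int) : Int :=
  (requests.foldl (MTFC_alt_step in_cache)
    ((List.range in_cache.length).map (fun i : Nat => -(i : Int)), 1, 0)).2.2

-- ===== PRECONDITION & SPEC =====
def Spec_MTFC (in_cache : List Int) (requests : List Int) (out : Int) : Prop := out = MTFC_alt in_cache requests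
instance (in_cache : List Int) (requests : List Int) (out : Int) : Decidable (Spec_MTFC in_cache requests out) := by unfold Spec_MTFC; infer_instance

-- ===== CLAIM (what is proved, stated in full; the proofs are below) =====
def Claim_equal_MTFC : Prop := ∀ (in_cache : List Int) (requests : List Int), Dom_MTFC in_cache requests → Spec_MTFC in_cache requests (MTFC in_cache requests)

-- ===== LEMMAS AND PROOFS =====

-- virtual position of timestamp t: number of slots used more recently
def pvPos (tss : List Int) (t : Int) : Nat := tss.countP (fun u => decide (t < u))

-- coupling invariant: A's list L lists the cache values in decreasing order of B's timestamps
def pvInv (vals L tss : List Int) (step : Int) : Prop :=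
  tss.length = vals.length ∧ L.length = vals.length ∧ tss.Nodup ∧
  (∀ t ∈ tss, t < step) ∧
  (∀ j (hj : j < tss.length), L[pvPos tss tss[j]]? = vals[j]?)

theorem pv_countP_lt {α : Type} {l : List α} {p q : α → Bool} (himp : ∀ a ∈ l, q a → p a)
    {b : α} (hb : b ∈ l) (hp : p b) (hq : ¬ q b) : l.countP q < l.countP p := by
  induction l with
  | nil => cases hb
  | cons x xs ih =>
      have hmono : xs.countP q ≤ xs.countP p :=
        List.countP_mono_left (fun a ha hqa => himp a (List.mem_cons_of_mem x ha) hqa)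
      rcases List.mem_cons.1 hb with rfl | hb'
      · have hqf : q b = false := by revert hq; cases q b <;> simp
        simp only [List.countP_cons, hp, hqf]
        simp only [if_true]
        simp only [Bool.false_eq_true, if_false]
        omega
      · have := ih (fun a ha hqa => himp a (List.mem_cons_of_mem x ha) hqa) hb'
        simp only [List.countP_cons]
        have hx : q x = true → p x = true := himp x (List.mem_cons_self)
        by_cases hqx : q x = true <;> simp [hqx, hx] <;> omega

theorem pvPos_lt {tss : List Int} {t : Int} (ht : t ∈ tss) : pvPos tss t < tss.length := by
  unfold pvPos
  have hle := List.countP_le_length (p := fun u => decide (t < u)) (l := tss)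
  rcases Nat.lt_or_ge (tss.countP (fun u => decide (t < u))) tss.length with h | h
  · exact h
  · exfalso
    have heq : tss.countP (fun u => decide (t < u)) = tss.length := le_antisymm hle h
    have := (List.countP_eq_length).1 heq t ht
    simp at this

theorem pvPos_anti {tss : List Int} {t₁ t₂ : Int} (h : t₁ < t₂) (h₂ : t₂ ∈ tss) :
    pvPos tss t₂ < pvPos tss t₁ := by
  unfold pvPos
  refine pv_countP_lt (fun a _ hqa => ?_) h₂ (by simp; omega) (by simp)
  simp at hqa ⊢
  omega

theorem pvPos_inj {tss : List Int} {t₁ t₂ : Int} (h₁ : t₁ ∈ tss) (h₂ : t₂ ∈ tss)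
    (h : pvPos tss t₁ = pvPos tss t₂) : t₁ = t₂ := by
  rcases lt_trichotomy t₁ t₂ with hlt | heq | hgt
  · exact absurd h (Nat.ne_of_gt (pvPos_anti hlt h₂))
  · exact heq
  · exact absurd h (Nat.ne_of_lt (pvPos_anti hgt h₁))

theorem pvPos_surj {tss : List Int} (hnd : tss.Nodup) {i : Nat} (hi : i < tss.length) :
    ∃ j, ∃ hj : j < tss.length, pvPos tss tss[j] = i := by
  classical
  let f : Fin tss.length → Fin tss.length :=
    fun j => ⟨pvPos tss tss[j.1], pvPos_lt (tss.getElem_mem j.2)⟩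
  have hinj : Function.Injective f := by
    intro a b hab
    have : pvPos tss tss[a.1] = pvPos tss tss[b.1] := congrArg Fin.val hab
    have := pvPos_inj (tss.getElem_mem a.2) (tss.getElem_mem b.2) this
    exact Fin.ext ((hnd.getElem_inj_iff).1 this)
  have hsurj : Function.Surjective f := Finite.injective_iff_surjective.1 hinj
  obtain ⟨j, hj⟩ := hsurj ⟨i, hi⟩
  exact ⟨j.1, j.2, congrArg Fin.val hj⟩

theorem MTFC_scan_none {r : Int} {L : List Int} {i : Nat} (h : MTFC_scan r L i = none) :
    ∀ m, i ≤ m → ∀ hm : m < L.length, L[m] ≠ r := by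
  fun_induction MTFC_scan r L i with
  | case1 i hi heq => simp at h
  | case2 i hi hne ih =>
      intro m him hm
      rcases Nat.eq_or_lt_of_le him with rfl | hlt
      · exact fun hc => absurd hc.symm (by simpa using hne : ¬ r = L[i])
      · exact ih h m hlt hm
  | case3 i hi =>
      intro m him hm
      omega

theorem MTFC_scan_some {r : Int} {L : List Int} {i k : Nat} (h : MTFC_scan r L i = some k) :
    ∃ hk : k < L.length, L[k] = r ∧ ∀ m, i ≤ m → m < k → ∀ hm : m < L.length, L[m] ≠ r := by
  fun_induction MTFC_scan r L i with
  | case1 i hi heq =>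
      have hik : i = k := by simpa using h
      subst hik
      have hr : r = L[i] := by simpa using heq
      exact ⟨hi, hr.symm, fun m h1 h2 _ => by omega⟩
  | case2 i hi hne ih =>
      obtain ⟨hk, hkr, hmin⟩ := ih h
      refine ⟨hk, hkr, fun m h1 h2 hm => ?_⟩
      rcases Nat.eq_or_lt_of_le h1 with rfl | hlt
      · exact fun hc => absurd hc.symm (by simpa using hne : ¬ r = L[i])
      · exact hmin m hlt h2 hm
  | case3 i hi => simp at h

-- loop invariant of B's find: what 'best' says about the first n slots
def pvGood (r : Int) (vals tss : List Int) (n : Nat) (best : Option (Int × Nat)) : Prop :=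
  match best with
  | none => ∀ j, j < n → ∀ _hv : j < vals.length, vals[j] ≠ r
  | some (bt, bj) => bj < n ∧ ∃ hbv : bj < vals.length, ∃ hbt : bj < tss.length,
      vals[bj] = r ∧ tss[bj] = bt ∧
      ∀ j, j < n → ∀ (hv : j < vals.length) (ht : j < tss.length), vals[j] = r → tss[j] ≤ bt

theorem pvGood_step {r : Int} {vals tss : List Int} {n : Nat} {best : Option (Int × Nat)}
    (hn : n < vals.length) (hnt : n < tss.length) (hg : pvGood r vals tss n best) :
    pvGood r vals tss (n + 1)
      (if vals[n] == r && (match best with | none => true | some (bt, _) => decide (bt < tss[n]))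
       then some (tss[n], n) else best) := by
  cases best with
  | none =>
      by_cases hv : vals[n] = r
      · simp only [hv, BEq.rfl, Bool.true_and, if_true]
        refine ⟨by omega, hn, hnt, hv, rfl, ?_⟩
        intro j hj hv' ht' hr
        rcases Nat.lt_or_ge j n with hlt | hge
        · exact absurd hr (hg j hlt hv')
        · have : j = n := by omega
          subst this
          exact le_refl _
      · have : (vals[n] == r) = false := by simpa using hv
        simp only [this, Bool.false_and]
        intro j hj hv'
        rcases Nat.lt_or_ge j n with hlt | hge
        · exact hg j hlt hv'
        · have : j = n := by omega
          subst this
          exact hv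
  | some p =>
      obtain ⟨bt, bj⟩ := p
      obtain ⟨hbjn, hbv, hbt, hbr, hbts, hmax⟩ := hg
      by_cases hcond : vals[n] = r ∧ bt < tss[n]
      · have hc : (vals[n] == r && decide (bt < tss[n])) = true := by
          simp [hcond.1, hcond.2]
        simp only [hc, if_true]
        refine ⟨by omega, hn, hnt, hcond.1, rfl, ?_⟩
        intro j hj hv' ht' hr
        rcases Nat.lt_or_ge j n with hlt | hge
        · exact le_trans (hmax j hlt hv' ht' hr) (le_of_lt hcond.2)
        · have : j = n := by omega
          subst this
          exact le_refl _
      · have hc : (vals[n] == r && decide (bt < tss[n])) = false := by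
          by_cases hv : vals[n] = r
          · have : ¬ bt < tss[n] := fun hlt => hcond ⟨hv, hlt⟩
            simp [this]
          · simp [hv]
        simp only [hc]
        refine ⟨by omega, hbv, hbt, hbr, hbts, ?_⟩
        intro j hj hv' ht' hr
        rcases Nat.lt_or_ge j n with hlt | hge
        · exact hmax j hlt hv' ht' hr
        · have heqn : j = n := by omega
          subst heqn
          have hnb : ¬ bt < tss[j] := fun hlt => hcond ⟨hr, hlt⟩
          omega

theorem MTFC_alt_find_spec {r : Int} {vals tss : List Int} (hlen : tss.length = vals.length) :
    ∀ n best, n ≤ vals.length → pvGood r vals tss n best →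
      pvGood r vals tss vals.length (MTFC_alt_find r ((vals.zip tss).drop n) n best) := by
  intro n best
  induction hfuel : vals.length - n generalizing n best with
  | zero =>
      intro hn hg
      have hne : n = vals.length := by omega
      subst hne
      have hdrop : (vals.zip tss).drop vals.length = [] := by
        apply List.drop_eq_nil_of_le
        simp [List.length_zip, hlen]
      rw [hdrop]
      simpa [MTFC_alt_find] using hg
  | succ m ih =>
      intro hn hg
      have hnlt : n < vals.length := by omega
      have hnt : n < tss.length := by omega
      have hzlen : n < (vals.zip tss).length := by
        simp only [List.length_zip, hlen, Nat.min_self]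
        omega
      have hdrop : (vals.zip tss).drop n = (vals[n], tss[n]) :: (vals.zip tss).drop (n + 1) := by
        rw [← List.getElem_cons_drop hzlen]
        congr 1
        exact List.getElem_zip
      rw [hdrop]
      cases best with
      | none =>
          simp only [MTFC_alt_find]
          exact ih (n + 1) _ (by omega) (by omega) (pvGood_step hnlt hnt hg)
      | some p =>
          obtain ⟨bt, bj⟩ := p
          simp only [MTFC_alt_find]
          exact ih (n + 1) _ (by omega) (by omega) (pvGood_step hnlt hnt hg)

theorem pv_countP_range (n j : Nat) (h : j ≤ n) :
    (List.range n).countP (fun i => decide (i < j)) = j := by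
  induction n with
  | zero => simp; omega
  | succ n ih =>
      rw [List.range_succ, List.countP_append]
      rcases Nat.lt_or_ge n j with hlt | hge
      · have hje : j = n + 1 := by omega
        subst hje
        have hall : (List.range n).countP (fun i => decide (i < n + 1)) = n := by
          have h2 := List.countP_eq_length (l := List.range n) (p := fun i => decide (i < n + 1))
          rw [h2.2 (fun a ha => by simp at ha ⊢; omega)]
          simp
        rw [hall]
        simp
      · have hnf : (decide (n < j)) = false := by simp; omega
        simp [ih (by omega), hnf]

theorem pvPos_init {n j : Nat} (hj : j < n) :
    pvPos ((List.range n).map (fun i : Nat => -(i : Int))) (-(j : Int)) = j := by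
  unfold pvPos
  rw [List.countP_map]
  have hcongr : ∀ a ∈ List.range n,
      (((fun u => decide (-(j : Int) < u)) ∘ (fun i : Nat => -(i : Int))) a = true ↔
        (fun i : Nat => decide (i < j)) a = true) := by
    intro a _
    simp only [Function.comp_apply, decide_eq_true_eq]
    omega
  rw [List.countP_congr hcongr]
  exact pv_countP_range n j (by omega)

theorem pvInv_init (vals : List Int) :
    pvInv vals vals ((List.range vals.length).map (fun i : Nat => -(i : Int))) 1 := by
  refine ⟨by simp, rfl, ?_, ?_, ?_⟩
  · have hinj : Function.Injective (fun i : Nat => -(i : Int)) := by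
      intro a b hab
      simp only at hab
      omega
    exact List.nodup_range.map hinj
  · intro t ht
    simp only [List.mem_map, List.mem_range] at ht
    obtain ⟨i, _, rfl⟩ := ht
    omega
  · intro j hj
    have hjn : j < vals.length := by simpa using hj
    have hget : ((List.range vals.length).map (fun i : Nat => -(i : Int)))[j] = -(j : Int) := by
      simp
    rw [hget, pvPos_init hjn]

theorem pv_step_match (vals L tss : List Int) (step c : Int) (r : Int)
    (h : pvInv vals L tss step) :
    pvInv vals (MTFC_step (L, c) r).1 (MTFC_alt_step vals (tss, step, c) r).1
      (MTFC_alt_step vals (tss, step, c) r).2.1 ∧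
    (MTFC_step (L, c) r).2 = (MTFC_alt_step vals (tss, step, c) r).2.2 := by
  obtain ⟨hlen, hLlen, hnd, hbound, hpos⟩ := h
  have hfind := MTFC_alt_find_spec (r := r) hlen 0 none (by omega) (by intro j hj _; omega)
  rw [List.drop_zero] at hfind
  cases hf : MTFC_alt_find r (vals.zip tss) 0 none with
  | none =>
      rw [hf] at hfind
      have hscan : MTFC_scan r L 0 = none := by
        cases hs : MTFC_scan r L 0 with
        | none => rfl
        | some i =>
            exfalso
            obtain ⟨hiL, hir, _⟩ := MTFC_scan_some hs
            obtain ⟨j, hj, hpj⟩ := pvPos_surj hnd (i := i) (by omega : i < tss.length)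
            have hLj := hpos j hj
            rw [hpj] at hLj
            have hji : j < vals.length := by omega
            rw [List.getElem?_eq_getElem hiL, List.getElem?_eq_getElem hji] at hLj
            injection hLj with hLj
            exact hfind j hji hji (by rw [← hLj]; exact hir)
      simp only [MTFC_step, MTFC_alt_step, hscan, hf]
      exact ⟨⟨hlen, hLlen, hnd, hbound, hpos⟩, trivial⟩
  | some p =>
      obtain ⟨bt, bj⟩ := p
      rw [hf] at hfind
      obtain ⟨hbjn, hbv, hbt, hbr, hbts, hmax⟩ := hfind
      have hbmem : bt ∈ tss := hbts ▸ tss.getElem_mem hbt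
      have hiL : pvPos tss bt < L.length := by
        have := pvPos_lt hbmem; omega
      have hLi : L[pvPos tss bt]? = some r := by
        have hp := hpos bj hbt
        rw [hbts] at hp
        rw [hp, List.getElem?_eq_getElem hbv, hbr]
      have hLig : L[pvPos tss bt] = r := by
        rw [List.getElem?_eq_getElem hiL] at hLi
        injection hLi
      have hscan : MTFC_scan r L 0 = some (pvPos tss bt) := by
        cases hs : MTFC_scan r L 0 with
        | none =>
            exfalso
            exact MTFC_scan_none hs (pvPos tss bt) (by omega) hiL hLig
        | some k =>
            obtain ⟨hkL, hkr, hmin⟩ := MTFC_scan_some hs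
            have hki : k ≤ pvPos tss bt := by
              by_contra hgt
              exact hmin (pvPos tss bt) (by omega) (by omega) hiL hLig
            rcases Nat.eq_or_lt_of_le hki with heq | hlt
            · rw [heq]
            · exfalso
              obtain ⟨j, hj, hpj⟩ := pvPos_surj hnd (i := k) (by omega : k < tss.length)
              have hpk := hpos j hj
              rw [hpj] at hpk
              have hjv : j < vals.length := by omega
              have hvj : vals[j] = r := by
                rw [List.getElem?_eq_getElem hkL, List.getElem?_eq_getElem hjv] at hpk
                injection hpk with hpk
                rw [← hpk]; exact hkr
              have hle := hmax j (by omega) hjv hj hvj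
              have hne : tss[j] ≠ bt := by
                intro he
                apply Nat.ne_of_lt hlt
                rw [← hpj, he]
              have hltts : tss[j] < bt := lt_of_le_of_ne hle hne
              have hanti := pvPos_anti hltts hbmem
              rw [hpj] at hanti
              omega
      simp only [MTFC_step, MTFC_alt_step, hscan, hf]
      have hstepnot : step ∉ tss := fun hmem => absurd (hbound _ hmem) (lt_irrefl step)
      refine ⟨⟨?_, ?_, hnd.set hstepnot, ?_, ?_⟩, ?_⟩
      · simp [hlen]
      · simp only [List.length_cons, List.length_append, List.length_take, List.length_drop]
        omega
      · intro t ht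
        rcases List.mem_or_eq_of_mem_set ht with hmem | rfl
        · exact lt_trans (hbound t hmem) (by omega)
        · omega
      · intro j hj
        have hjt : j < tss.length := by simpa using hj
        have hjv : j < vals.length := by omega
        by_cases hjb : j = bj
        · subst hjb
          have hget : (tss.set j step)[j] = step := by
            rw [List.getElem_set]
            simp
          rw [hget]
          have hzero : pvPos (tss.set j step) step = 0 := by
            unfold pvPos
            apply List.countP_eq_zero.2
            intro u hu
            rcases List.mem_or_eq_of_mem_set hu with hmem | rfl
            · have := hbound u hmem
              simp; omega
            · simp
          rw [hzero]
          rw [List.getElem?_eq_getElem hjv, hbr]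
          rfl
        · have hget : (tss.set bj step)[j] = tss[j] := by
            rw [List.getElem_set]
            have hbjj : bj ≠ j := fun h => hjb h.symm
            simp [hbjj]
          rw [hget]
          have htmem : tss[j] ∈ tss := tss.getElem_mem hjt
          have htlt : tss[j] < step := hbound _ htmem
          have htne : tss[j] ≠ bt := by
            intro he
            apply hjb
            have : tss[j] = tss[bj] := by rw [he, hbts]
            exact (hnd.getElem_inj_iff).1 this
          have hcount := List.countP_set (l := tss) (i := bj) (a := step)
            (p := fun u => decide (tss[j] < u)) hbt
          rw [hbts] at hcount
          have hPL : pvPos tss tss[j] < tss.length := pvPos_lt htmem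
          have hPneI : pvPos tss tss[j] ≠ pvPos tss bt :=
            fun he => htne (pvPos_inj htmem hbmem he)
          have hLP := hpos j hjt
          rcases lt_trichotomy tss[j] bt with hlt | heq | hgt
          · -- tss[j] < bt : position unchanged
            have hanti := pvPos_anti hlt hbmem
            have hnew : pvPos (tss.set bj step) tss[j] = pvPos tss tss[j] := by
              unfold pvPos
              rw [hcount]
              have h1 : decide (tss[j] < bt) = true := by simpa using hlt
              have h2 : decide (tss[j] < step) = true := by simpa using htlt
              rw [h1, h2]
              simp only [if_true]
              have hge1 : 1 ≤ tss.countP (fun u => decide (tss[j] < u)) := by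
                show 1 ≤ pvPos tss tss[j]
                omega
              omega
            rw [hnew]
            obtain ⟨m, hm⟩ : ∃ m, pvPos tss tss[j] = m + 1 :=
              ⟨pvPos tss tss[j] - 1, by omega⟩
            rw [hm] at hLP ⊢
            rw [List.getElem?_cons_succ]
            have htklen : (L.take (pvPos tss bt)).length = pvPos tss bt := by
              simp; omega
            rw [List.getElem?_append_right (by omega : (L.take (pvPos tss bt)).length ≤ m)]
            rw [List.getElem?_drop, htklen]
            have harith : pvPos tss bt + 1 + (m - pvPos tss bt) = m + 1 := by omega
            rw [harith]
            exact hLP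
          · exact absurd heq htne
          · -- bt < tss[j] : position shifts by one
            have hanti := pvPos_anti hgt htmem
            have hnew : pvPos (tss.set bj step) tss[j] = pvPos tss tss[j] + 1 := by
              unfold pvPos
              rw [hcount]
              have h1 : decide (tss[j] < bt) = false := by simp; omega
              have h2 : decide (tss[j] < step) = true := by simpa using htlt
              rw [h1, h2]
              simp
            rw [hnew]
            rw [List.getElem?_cons_succ]
            have htklen : (L.take (pvPos tss bt)).length = pvPos tss bt := by
              simp; omega
            rw [List.getElem?_append_left (by omega : pvPos tss tss[j] < (L.take (pvPos tss bt)).length)]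
            rw [List.getElem?_take]
            rw [if_pos (by omega : pvPos tss tss[j] < pvPos tss bt)]
            exact hLP
      · show c + ((pvPos tss bt : Int) + 1) = c + 1 + (tss.countP (fun t => decide (bt < t)) : Int)
        unfold pvPos
        omega

theorem pv_fold_match (requests : List Int) :
    ∀ (vals L tss : List Int) (step c : Int), pvInv vals L tss step →
      (requests.foldl MTFC_step (L, c)).2 =
      (requests.foldl (MTFC_alt_step vals) (tss, step, c)).2.2 := by
  intro vals L tss step c h
  induction requests generalizing L tss step c with
  | nil => rfl
  | cons r rest ih =>
      simp only [List.foldl_cons]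
      obtain ⟨hInv, hc⟩ := pv_step_match vals L tss step c r h
      have h2 : (MTFC_alt_step vals (tss, step, c) r) =
          ((MTFC_alt_step vals (tss, step, c) r).1, (MTFC_alt_step vals (tss, step, c) r).2.1,
            (MTFC_step (L, c) r).2) := by rw [hc]
      rw [h2]
      exact ih (MTFC_step (L, c) r).1 (MTFC_alt_step vals (tss, step, c) r).1
        (MTFC_alt_step vals (tss, step, c) r).2.1 (MTFC_step (L, c) r).2 hInv

-- ===== VERDICT (by name: the statement is the Claim_ definition above) =====
theorem MTFC_spec : Claim_equal_MTFC := by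
  intro in_cache requests _
  unfold Spec_MTFC MTFC MTFC_alt
  exact pv_fold_match requests in_cache in_cache _ 1 0 (pvInv_init in_cache)
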